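-- pv_equiv track=rewrite | github.com/Neogul02/Algorithm | 프로그래머스/2/42586. 기능개발/기능개발.py | solution
-- ===== SOURCE A (Python) =====
-- from math import ceil
--
-- def solution(progresses, speeds):
--     days = [ceil((100 - p) / s) for p, s in zip(progresses, speeds)]
--
--     result = []
--     cur = days[0]
--     count = 1
--
--     for d in days[1:]:
--         if d <= cur:
--             count += 1
--         else:
--             result.append(count)
--             cur = d
--             count = 1
--
--     result.append(count)
--     return result
-- ===== SOURCE B (Python) =====
-- def solution(progresses, speeds):
--     # Release-day view: task i actually ships on day max(days[0..i]) (it waits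
--     # for its slowest predecessor), so a deploy batch is one distinct release
--     # day and the answer is the multiplicity of each distinct release day, in
--     # first-appearance order (dict preserves insertion order).
--     release = []
--     m = None
--     for p, s in zip(progresses, speeds):
--         d = -((p - 100) // s)   # exact integer ceil((100 - p) / s)
--         if m is None or d > m:
--             m = d
--         release.append(m)
--     counts = {}
--     for r in release:
--         counts[r] = counts.get(r, 0) + 1
--     return list(counts.values())
-- ===== Notes on version B (the rewrite author's own statement) =====
-- stated objective: alternative
-- what changed: A's run-grouping state machine (cur/count with an append on each leader change) is replaced by a release-day view: one pass computes the running maximum of the completion days (the day each task actually ships), then a dict counts the multiplicity of each distinct release day and the answer is the dict's values; the float ceil((100-p)/s) becomes exact integer floor-division -((p-100)//s).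
import Mathlib
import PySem

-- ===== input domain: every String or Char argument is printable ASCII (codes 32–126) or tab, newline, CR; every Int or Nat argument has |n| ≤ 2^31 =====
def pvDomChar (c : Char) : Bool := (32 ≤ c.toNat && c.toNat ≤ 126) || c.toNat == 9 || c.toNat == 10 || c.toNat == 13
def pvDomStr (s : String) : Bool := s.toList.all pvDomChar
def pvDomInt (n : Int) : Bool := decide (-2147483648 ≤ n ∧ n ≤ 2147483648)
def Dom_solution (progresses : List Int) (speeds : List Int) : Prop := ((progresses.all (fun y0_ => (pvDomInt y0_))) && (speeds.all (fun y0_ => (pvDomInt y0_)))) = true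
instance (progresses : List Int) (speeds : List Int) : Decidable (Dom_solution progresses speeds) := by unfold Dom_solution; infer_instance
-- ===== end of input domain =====

-- B replaces A's run-grouping state machine by a running-maximum (release-day) pass
-- followed by a dict multiplicity count; return values proved equal on Pre_.
-- ===== PORT A =====
-- ceil((100-p)/s): on Dom (|ints| ≤ 2^31) Python's float ceil equals the exact
-- integer ceil, ported as -((p-100) floordiv s); s = 0 (ZeroDivisionError) is excluded by Pre_.
def solution (progresses : List Int) (speeds : List Int) : List Int :=
  let days := (progresses.zip speeds).map (fun ps => -(PySem.Int.floordiv (ps.1 - 100) ps.2))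
  let cur := days.headD 0   -- days[0]; Pre_ guarantees days ≠ [] (else Python raises IndexError)
  let st := days.tail.foldl
    (fun (st : List Int × Int × Int) d =>
      if d ≤ st.2.1 then (st.1, st.2.1, st.2.2 + 1)
      else (st.1 ++ [st.2.2], d, 1))
    ([], cur, 1)
  st.1 ++ [st.2.2]

-- ===== PORT B =====
-- one iteration of the first loop: running maximum (m = None until the first
-- element, so the state is Option Int)
def relStep (st : List Int × Option Int) (ps : Int × Int) : List Int × Option Int :=
  let d := -(PySem.Int.floordiv (ps.1 - 100) ps.2)
  let m := match st.2 with
    | none => d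
    | some m => if d > m then d else m
  (st.1 ++ [m], some m)

def solution_alt (progresses : List Int) (speeds : List Int) : List Int :=
  let st := (progresses.zip speeds).foldl relStep ([], none)
  let release := st.1
  let counts := release.foldl
    (fun (c : PySem.Dict Int Int) r => c.insert r (c.getD r 0 + 1))
    PySem.Dict.empty
  counts.values

-- ===== PRECONDITION & SPEC =====
-- A raises IndexError on empty input (days[0]) and ZeroDivisionError when a zipped
-- speed is 0; Pre_ excludes exactly those inputs.
def Pre_solution (progresses : List Int) (speeds : List Int) : Prop :=
  progresses ≠ [] ∧ speeds ≠ [] ∧ ∀ ps ∈ progresses.zip speeds, ps.2 ≠ 0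
instance (progresses : List Int) (speeds : List Int) : Decidable (Pre_solution progresses speeds) := by unfold Pre_solution; infer_instance
def pvWitness_solution : List Int × List Int := ([30, 30, 95], [30, 1, 99])
def Spec_solution (progresses : List Int) (speeds : List Int) (out : List Int) : Prop := out = solution_alt progresses speeds
instance (progresses : List Int) (speeds : List Int) (out : List Int) : Decidable (Spec_solution progresses speeds out) := by unfold Spec_solution; infer_instance

-- ===== CLAIM =====
def Claim_equal_solution : Prop := ∀ (progresses : List Int) (speeds : List Int), Dom_solution progresses speeds → Pre_solution progresses speeds → Spec_solution progresses speeds (solution progresses speeds)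

-- ===== LEMMAS AND PROOFS =====

-- A's grouping, as a plain recursion over the remaining days
def grp (cur c : Int) : List Int → List Int
  | [] => [c]
  | d :: ds => if d ≤ cur then grp cur (c + 1) ds else c :: grp d 1 ds

theorem grp_cons (cur c d : Int) (ds : List Int) :
    grp cur c (d :: ds) = if d ≤ cur then grp cur (c + 1) ds else c :: grp d 1 ds := rfl

-- running maximum stream after the first element
def rel (cur : Int) : List Int → List Int
  | [] => []
  | d :: ds => (if cur < d then d else cur) :: rel (if cur < d then d else cur) ds

theorem le_of_mem_rel (ds : List Int) : ∀ cur x, x ∈ rel cur ds → cur ≤ x := by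
  induction ds with
  | nil => intro cur x h; simp [rel] at h
  | cons d ds ih =>
    intro cur x h
    simp only [rel, List.mem_cons] at h
    by_cases hc : cur < d
    · simp only [hc, if_true] at h
      rcases h with h | h
      · omega
      · have := ih d x h; omega
    · simp only [hc, if_false] at h
      rcases h with h | h
      · omega
      · exact ih cur x h

-- A's fold finishes to res ++ grp cur c ds
theorem foldA_eq_grp (ds : List Int) : ∀ (cur c : Int) (res : List Int),
    ((ds.foldl
        (fun (st : List Int × Int × Int) d =>
          if d ≤ st.2.1 then (st.1, st.2.1, st.2.2 + 1)
          else (st.1 ++ [st.2.2], d, 1))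
        (res, cur, c)).1
      ++ [(ds.foldl
        (fun (st : List Int × Int × Int) d =>
          if d ≤ st.2.1 then (st.1, st.2.1, st.2.2 + 1)
          else (st.1 ++ [st.2.2], d, 1))
        (res, cur, c)).2.2])
    = res ++ grp cur c ds := by
  induction ds with
  | nil => intro cur c res; simp [grp]
  | cons d ds ih =>
    intro cur c res
    by_cases h : d ≤ cur
    · simp only [List.foldl_cons, grp, h, if_true]
      exact ih cur (c + 1) res
    · simp only [List.foldl_cons, grp, h, if_false]
      rw [ih d 1 (res ++ [c])]
      simp

-- B's first fold builds acc ++ rel m l (once m is set)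
theorem foldB_rel (l : List (Int × Int)) : ∀ (acc : List Int) (m : Int),
    (l.foldl relStep (acc, some m)).1
    = acc ++ rel m (l.map (fun ps => -(PySem.Int.floordiv (ps.1 - 100) ps.2))) := by
  induction l with
  | nil => intro acc m; simp [rel]
  | cons q l ih =>
    intro acc m
    simp only [List.foldl_cons, List.map_cons, rel]
    by_cases h : m < -(PySem.Int.floordiv (q.1 - 100) q.2)
    · simp only [relStep, h, if_true]
      rw [ih]; simp
    · simp only [relStep, h, if_false]
      rw [ih]; simp

-- Set.ofList of a nonempty constant run is the singleton
theorem ofList_replicate (x : Int) : ∀ (c : Nat), 0 < c →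
    PySem.Set.ofList (List.replicate c x) = [x] := by
  intro c
  induction c with
  | zero => omega
  | succ n ih =>
    intro _
    rw [(by rw [List.replicate_succ'] : List.replicate (n+1) x = List.replicate n x ++ [x]),
      PySem.Set.ofList_append_singleton]
    cases n with
    | zero => rfl
    | succ k =>
      rw [ih (by omega)]
      exact PySem.Set.add_of_mem (by simp)

-- Set.ofList of (constant run ++ tail avoiding the constant)
theorem ofList_replicate_append (x : Int) (L : List Int) (c : Nat) (hc : 0 < c)
    (hx : x ∉ L) :
    PySem.Set.ofList (List.replicate c x ++ L) = x :: PySem.Set.ofList L := by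
  rw [PySem.Set.ofList_append, ofList_replicate x c hc,
    PySem.Set.update_eq_append_filter]
  have : (PySem.Set.ofList L).filter (fun y => !(PySem.Set.contains [x] y))
      = PySem.Set.ofList L := by
    apply List.filter_eq_self.mpr
    intro y hy
    have hyL : y ∈ L := (PySem.Set.mem_ofList L y).mp hy
    have : y ≠ x := fun h => hx (h ▸ hyL)
    simp [PySem.Set.contains, this]
  rw [this]
  rfl

-- the counting key lemma: distinct values of a (run ++ strictly-larger tail) list,
-- each with its multiplicity, are exactly A's groups
theorem counts_eq_grp (ds : List Int) : ∀ (cur : Int) (c : Nat), 0 < c →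
    (PySem.Set.ofList (List.replicate c cur ++ rel cur ds)).map
        (fun k => ((List.replicate c cur ++ rel cur ds).count k : Int))
      = grp cur (c : Int) ds := by
  induction ds with
  | nil =>
    intro cur c hc
    simp only [rel, List.append_nil, grp]
    rw [ofList_replicate cur c hc]
    simp [List.count_replicate]
  | cons d ds ih =>
    intro cur c hc
    by_cases h : cur < d
    · -- new group: rel = d :: rel d ds, all of it > cur
      have hrel : rel cur (d :: ds) = d :: rel d ds := by simp [rel, h]
      have hgt : ∀ x ∈ d :: rel d ds, cur < x := by
        intro x hx
        rcases List.mem_cons.mp hx with hx | hx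
        · omega
        · have := le_of_mem_rel ds d x hx; omega
      have hne : cur ∉ d :: rel d ds := fun hmem => absurd (hgt cur hmem) (lt_irrefl cur)
      rw [hrel]
      have hL : (d :: rel d ds) = List.replicate 1 d ++ rel d ds := by simp
      rw [hL, ofList_replicate_append cur _ c hc (hL ▸ hne), List.map_cons]
      have hcnt_cur : ((List.replicate c cur ++ (List.replicate 1 d ++ rel d ds)).count cur : Int)
          = (c : Int) := by
        rw [List.count_append, List.count_replicate,
          List.count_eq_zero_of_not_mem (hL ▸ hne)]
        simp
      have hcnt_rest : (PySem.Set.ofList (List.replicate 1 d ++ rel d ds)).map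
            (fun k => ((List.replicate c cur ++ (List.replicate 1 d ++ rel d ds)).count k : Int))
          = (PySem.Set.ofList (List.replicate 1 d ++ rel d ds)).map
            (fun k => (((List.replicate 1 d ++ rel d ds)).count k : Int)) := by
        apply List.map_congr_left
        intro k hk
        have hkmem : k ∈ List.replicate 1 d ++ rel d ds :=
          (PySem.Set.mem_ofList _ k).mp hk
        have hkgt : cur < k := hgt k (hL ▸ hkmem)
        rw [List.count_append, List.count_replicate]
        have hb : (cur == k) = false := by
          simp only [beq_eq_false_iff_ne, ne_eq]
          omega
        rw [hb]
        simp
      rw [hcnt_cur, hcnt_rest, ih d 1 (by omega), grp_cons,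
        if_neg (by omega : ¬ d ≤ cur), Nat.cast_one]
    · -- same group: rel = cur :: rel cur ds, absorb into the replicate
      have hrel : rel cur (d :: ds) = cur :: rel cur ds := by simp [rel, h]
      rw [hrel]
      have : List.replicate c cur ++ cur :: rel cur ds
          = List.replicate (c + 1) cur ++ rel cur ds := by
        rw [List.replicate_succ']; simp
      rw [this]
      have := ih cur (c + 1) (by omega)
      push_cast at this ⊢
      rw [this, grp_cons, if_pos (by omega : d ≤ cur)]

-- B's counting loop is Counter; its values are multiplicities over the distinct keys
theorem countfold_values (release : List Int) :
    (release.foldl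
        (fun (c : PySem.Dict Int Int) r => c.insert r (c.getD r 0 + 1))
        PySem.Dict.empty).values
      = (PySem.Set.ofList release).map (fun k => ((release.count k : Int))) := by
  rw [PySem.Dict.foldl_insert_getD_add_one_eq_counter]
  simp only [PySem.Dict.values, PySem.Dict.items_counter, List.map_map]
  rfl

-- ===== VERDICT =====
theorem solution_spec : Claim_equal_solution := by
  intro progresses speeds _ hpre
  unfold Spec_solution solution solution_alt
  obtain ⟨hp, hs, _⟩ := hpre
  cases hq : progresses.zip speeds with
  | nil =>
    exfalso
    cases progresses with
    | nil => exact hp rfl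
    | cons p ps =>
      cases speeds with
      | nil => exact hs rfl
      | cons s ss => simp [List.zip] at hq
  | cons q qs =>
    simp only [List.map_cons, List.headD, List.tail, List.foldl_cons]
    rw [foldA_eq_grp (qs.map (fun ps => -(PySem.Int.floordiv (ps.1 - 100) ps.2)))
        (-(PySem.Int.floordiv (q.1 - 100) q.2)) 1 []]
    have hstep : relStep ([], none) q
        = ([-(PySem.Int.floordiv (q.1 - 100) q.2)], some (-(PySem.Int.floordiv (q.1 - 100) q.2))) := by
      simp [relStep]
    rw [hstep, foldB_rel qs [-(PySem.Int.floordiv (q.1 - 100) q.2)]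
        (-(PySem.Int.floordiv (q.1 - 100) q.2))]
    rw [countfold_values]
    have := counts_eq_grp (qs.map (fun ps => -(PySem.Int.floordiv (ps.1 - 100) ps.2)))
        (-(PySem.Int.floordiv (q.1 - 100) q.2)) 1 (by omega)
    simp only [List.replicate_one] at this
    simp only [List.nil_append, List.singleton_append] at this ⊢
    rw [this, Nat.cast_one]
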